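-- pv_equiv track=rewrite | github.com/wassen/lane_changing | src2/driving_video.py | left_max
-- ===== SOURCE A (Python) =====
-- def left_max(lanes_self, lane_numbers):
--     def change_of_ln(lanes_self, lane_numbers):
--         prev_num = 0
--         prev_self = 0
--
--         branch_lane = []
--         for i, (lane_self, lane_num) in enumerate(zip(lanes_self, lane_numbers)):
--             if prev_num != lane_num:
--                 branch_lane.append([lane_self - prev_self, prev_self - lane_self + lane_num - prev_num])
--             prev_self = lane_self
--             prev_num = lane_num
--         return branch_lane
--     branch_lane = change_of_ln(lanes_self, lane_numbers)
--     m = 0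
--     all_left_addition = 0
--     for left_lane_addition in branch_lane:
--         all_left_addition += left_lane_addition[0]
--         if all_left_addition > m:
--             m = all_left_addition
--     m -= 1
--     return m
-- ===== SOURCE B (Python) =====
-- def left_max(lanes_self, lane_numbers):
--     prev_num = 0
--     prev_self = 0
--     total = 0
--     m = 0
--     for lane_self, lane_num in zip(lanes_self, lane_numbers):
--         if prev_num != lane_num:
--             total += lane_self - prev_self
--             if total > m:
--                 m = total
--         prev_self = lane_self
--         prev_num = lane_num
--     return m - 1
-- ===== Notes on version B (the rewrite author's own statement) =====
-- stated objective: simpler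
-- what changed: Fuses A's two stages into one pass over zip(lanes_self, lane_numbers): no intermediate list of [delta, unused] pairs is built and the unused second field is never computed; the running sum and max are maintained directly (measured constant-factor speedup).
import Mathlib
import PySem

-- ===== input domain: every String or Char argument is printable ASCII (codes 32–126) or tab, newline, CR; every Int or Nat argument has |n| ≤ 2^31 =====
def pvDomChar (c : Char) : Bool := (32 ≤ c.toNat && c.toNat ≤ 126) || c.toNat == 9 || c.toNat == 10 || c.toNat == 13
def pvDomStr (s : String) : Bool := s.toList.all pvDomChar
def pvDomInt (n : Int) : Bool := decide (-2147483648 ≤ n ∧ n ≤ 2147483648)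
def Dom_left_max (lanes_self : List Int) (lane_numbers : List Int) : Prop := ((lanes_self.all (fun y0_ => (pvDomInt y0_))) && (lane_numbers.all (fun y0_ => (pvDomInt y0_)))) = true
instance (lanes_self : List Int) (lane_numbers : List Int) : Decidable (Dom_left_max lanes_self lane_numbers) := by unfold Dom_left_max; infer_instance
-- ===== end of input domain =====

-- B fuses A's build-list-then-scan into one O(1)-space pass (same values; no intermediate list).
-- ===== PORT A =====
-- inner helper change_of_ln: builds the branch_lane list of [delta, other] pairs
def changeOfLn_loop (prev_num prev_self : Int) : List (Int × Int) → List (Int × Int)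
  | [] => []
  | (lane_self, lane_num) :: rest =>
      (if prev_num ≠ lane_num then
        [(lane_self - prev_self, prev_self - lane_self + lane_num - prev_num)]
      else []) ++ changeOfLn_loop lane_num lane_self rest

-- second loop of A: running sum of first components, tracking the max
def leftMaxA_loop (m all_left_addition : Int) : List (Int × Int) → Int × Int
  | [] => (m, all_left_addition)
  | left_lane_addition :: rest =>
      let all' := all_left_addition + left_lane_addition.1
      leftMaxA_loop (if all' > m then all' else m) all' rest

def left_max (lanes_self : List Int) (lane_numbers : List Int) : Int :=
  let branch_lane := changeOfLn_loop 0 0 (lanes_self.zip lane_numbers)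
  let m := (leftMaxA_loop 0 0 branch_lane).1
  m - 1

-- ===== PORT B =====
def leftMaxB_loop (prev_num prev_self total m : Int) : List (Int × Int) → Int
  | [] => m
  | (lane_self, lane_num) :: rest =>
      if prev_num ≠ lane_num then
        let total' := total + (lane_self - prev_self)
        leftMaxB_loop lane_num lane_self total' (if total' > m then total' else m) rest
      else
        leftMaxB_loop lane_num lane_self total m rest

def left_max_alt (lanes_self : List Int) (lane_numbers : List Int) : Int :=
  leftMaxB_loop 0 0 0 0 (lanes_self.zip lane_numbers) - 1

-- ===== PRECONDITION & SPEC =====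
def Spec_left_max (lanes_self : List Int) (lane_numbers : List Int) (out : Int) : Prop := out = left_max_alt lanes_self lane_numbers
instance (lanes_self : List Int) (lane_numbers : List Int) (out : Int) : Decidable (Spec_left_max lanes_self lane_numbers out) := by unfold Spec_left_max; infer_instance

-- ===== CLAIM (what is proved, stated in full; the proofs are below) =====
def Claim_equal_left_max : Prop := ∀ (lanes_self : List Int) (lane_numbers : List Int), Dom_left_max lanes_self lane_numbers → Spec_left_max lanes_self lane_numbers (left_max lanes_self lane_numbers)

-- ===== LEMMAS AND PROOFS =====
theorem fuse (l : List (Int × Int)) : ∀ (pn ps tot m : Int),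
    (leftMaxA_loop m tot (changeOfLn_loop pn ps l)).1 = leftMaxB_loop pn ps tot m l := by
  induction l with
  | nil => intro pn ps tot m; rfl
  | cons p rest ih =>
      intro pn ps tot m
      obtain ⟨ls, ln⟩ := p
      by_cases h : pn ≠ ln
      · simp [changeOfLn_loop, leftMaxA_loop, leftMaxB_loop, h, ih]
      · simp [changeOfLn_loop, leftMaxB_loop, h, ih]

-- ===== VERDICT (by name: the statement is the Claim_ definition above) =====
theorem left_max_spec : Claim_equal_left_max := by
  intro lanes_self lane_numbers _
  unfold Spec_left_max left_max left_max_alt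
  simp [fuse]
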